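-- pv_equiv track=rewrite | github.com/wangzhx123/alpha-analyzer | generate_sample_data.py | generate_merged_alpha_data
-- ===== SOURCE A (Python) =====
-- def generate_merged_alpha_data(pm_positions, time_intervals, all_tickers):
--     """Generate MergedAlphaEv by summing ALL PM alphas for each ticker/time"""
--     data = []
--
--     for ti in time_intervals:
--         for ticker in all_tickers:
--             # Sum all PM targets for this ticker at this time
--             total_target = 0
--             for pm_id, positions in pm_positions.items():
--                 if ticker in positions:
--                     total_target += positions[ticker]
--
--             if total_target > 0:  # Only include if there's actual target
--                 alpha_id = f"GRP_{ti}_{ticker}"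
--                 data.append([
--                     "MergedAlphaEv", alpha_id, str(ti), ticker, str(total_target)
--                 ])
--
--     return data
-- ===== SOURCE B (Python) =====
-- def generate_merged_alpha_data(pm_positions, time_intervals, all_tickers):
--     """Generate MergedAlphaEv by summing ALL PM alphas for each ticker/time.
--     Builds per-ticker totals once, filters the positive tickers once, then
--     emits every row with a single flat comprehension."""
--     totals = {}
--     for positions in pm_positions.values():
--         for ticker, target in positions.items():
--             totals[ticker] = totals.get(ticker, 0) + target
--
--     positive = [(t, totals[t]) for t in all_tickers if totals.get(t, 0) > 0]
--
--     return [
--         ["MergedAlphaEv", f"GRP_{ti}_{t}", str(ti), t, str(v)]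
--         for ti in time_intervals
--         for (t, v) in positive
--     ]
-- ===== Notes on version B (the rewrite author's own statement) =====
-- stated objective: faster
-- what changed: B builds the per-ticker totals dict once, computes the positive (ticker,total) list once, and emits all rows with a single flat comprehension over intervals x that list, instead of A's rescan of every PM's positions for every (interval, ticker) pair.
import Mathlib
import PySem

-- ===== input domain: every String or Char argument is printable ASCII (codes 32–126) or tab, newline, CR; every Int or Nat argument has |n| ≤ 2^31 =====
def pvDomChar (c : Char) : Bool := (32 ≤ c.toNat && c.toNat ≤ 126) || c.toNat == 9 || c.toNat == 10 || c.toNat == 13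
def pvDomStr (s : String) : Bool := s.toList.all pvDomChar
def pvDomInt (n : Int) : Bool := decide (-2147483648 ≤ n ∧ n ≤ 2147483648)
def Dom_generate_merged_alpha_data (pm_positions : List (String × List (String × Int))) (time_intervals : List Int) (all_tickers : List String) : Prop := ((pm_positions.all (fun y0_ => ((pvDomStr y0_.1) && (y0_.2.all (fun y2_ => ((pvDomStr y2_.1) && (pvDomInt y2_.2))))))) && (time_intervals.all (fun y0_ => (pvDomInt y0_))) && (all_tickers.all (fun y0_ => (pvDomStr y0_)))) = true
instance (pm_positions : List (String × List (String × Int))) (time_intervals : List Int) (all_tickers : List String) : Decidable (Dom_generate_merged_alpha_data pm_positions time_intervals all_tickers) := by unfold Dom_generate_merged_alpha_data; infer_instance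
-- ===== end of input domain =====

-- B builds the per-ticker totals dict once, filters the positive tickers once, and emits all rows
-- with a single flat comprehension over intervals × that list, instead of A's rescan of every PM's
-- positions for every (interval, ticker) pair (objective: faster).

-- ===== PORT A =====
-- per-ticker total: 'for pm_id, positions in pm_positions.items(): if ticker in positions: total += positions[ticker]'
def pvStepA (ticker : String) (total : Int) (p : String × List (String × Int)) : Int :=
  if (PySem.Dict.mk p.2).contains ticker then total + ((PySem.Dict.mk p.2).get? ticker).getD 0
  else total

def pvTotalA (pm_positions : List (String × List (String × Int))) (ticker : String) : Int :=
  pm_positions.foldl (pvStepA ticker) 0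

def pvRowA (pm_positions : List (String × List (String × Int))) (ti : Int)
    (data : List (List String)) (ticker : String) : List (List String) :=
  let total := pvTotalA pm_positions ticker
  if total > 0 then
    data ++ [["MergedAlphaEv", "GRP_" ++ PySem.Int.toStr ti ++ "_" ++ ticker,
              PySem.Int.toStr ti, ticker, PySem.Int.toStr total]]
  else data

def generate_merged_alpha_data (pm_positions : List (String × List (String × Int))) (time_intervals : List Int) (all_tickers : List String) : List (List String) :=
  time_intervals.foldl (fun data ti => all_tickers.foldl (pvRowA pm_positions ti) data) []

-- ===== PORT B =====
-- one pass building totals: 'totals[ticker] = totals.get(ticker, 0) + target'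
def pvTotalsB (pm_positions : List (String × List (String × Int))) : PySem.Dict String Int :=
  pm_positions.foldl (fun totals p =>
    p.2.foldl (fun totals kv => totals.insert kv.1 (totals.getD kv.1 0 + kv.2)) totals)
    PySem.Dict.empty

-- 'positive = [(t, totals[t]) for t in all_tickers if totals.get(t, 0) > 0]'
def pvPositiveB (totals : PySem.Dict String Int) (all_tickers : List String) : List (String × Int) :=
  all_tickers.filterMap (fun t =>
    if totals.getD t 0 > 0 then some (t, totals.getD t 0) else none)

-- one row of the flat comprehension
def pvMkRowB (ti : Int) (p : String × Int) : List String :=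
  ["MergedAlphaEv", "GRP_" ++ PySem.Int.toStr ti ++ "_" ++ p.1,
   PySem.Int.toStr ti, p.1, PySem.Int.toStr p.2]

def generate_merged_alpha_data_alt (pm_positions : List (String × List (String × Int))) (time_intervals : List Int) (all_tickers : List String) : List (List String) :=
  let positive := pvPositiveB (pvTotalsB pm_positions) all_tickers
  time_intervals.flatMap (fun ti => positive.map (pvMkRowB ti))

-- ===== PRECONDITION & SPEC =====
-- Pre_ excludes association lists in which some PM's positions list repeats a ticker key:
-- such inputs cannot arise from a Python dict (dict keys are unique), so no Python-reachable input is excluded.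
def Pre_generate_merged_alpha_data (pm_positions : List (String × List (String × Int))) (time_intervals : List Int) (all_tickers : List String) : Prop :=
  ∀ p ∈ pm_positions, (p.2.map Prod.fst).Nodup
instance (pm_positions : List (String × List (String × Int))) (time_intervals : List Int) (all_tickers : List String) : Decidable (Pre_generate_merged_alpha_data pm_positions time_intervals all_tickers) := by unfold Pre_generate_merged_alpha_data; infer_instance
def pvWitness_generate_merged_alpha_data : (List (String × List (String × Int))) × List Int × List String :=
  ([("pm1", [("AAPL", 5), ("MSFT", -2)]), ("pm2", [("AAPL", 3)])], [1, 2], ["AAPL", "MSFT", "GOOG"])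

def Spec_generate_merged_alpha_data (pm_positions : List (String × List (String × Int))) (time_intervals : List Int) (all_tickers : List String) (out : List (List String)) : Prop := out = generate_merged_alpha_data_alt pm_positions time_intervals all_tickers
instance (pm_positions : List (String × List (String × Int))) (time_intervals : List Int) (all_tickers : List String) (out : List (List String)) : Decidable (Spec_generate_merged_alpha_data pm_positions time_intervals all_tickers out) := by unfold Spec_generate_merged_alpha_data; infer_instance

-- ===== CLAIM (what is proved, stated in full; the proofs are below) =====
def Claim_equal_generate_merged_alpha_data : Prop := ∀ (pm_positions : List (String × List (String × Int))) (time_intervals : List Int) (all_tickers : List String), Dom_generate_merged_alpha_data pm_positions time_intervals all_tickers → Pre_generate_merged_alpha_data pm_positions time_intervals all_tickers → Spec_generate_merged_alpha_data pm_positions time_intervals all_tickers (generate_merged_alpha_data pm_positions time_intervals all_tickers)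

-- ===== LEMMAS AND PROOFS =====

lemma pvStepA_shift (t : String) (a : Int) (p : String × List (String × Int)) :
    pvStepA t a p = a + pvStepA t 0 p := by
  unfold pvStepA; split_ifs <;> omega

lemma pvTotalA_shift (pm : List (String × List (String × Int))) (t : String) (a : Int) :
    pm.foldl (pvStepA t) a = a + pvTotalA pm t := by
  unfold pvTotalA
  induction pm generalizing a with
  | nil => simp
  | cons p rest ih =>
    simp only [List.foldl_cons]
    rw [ih, ih (pvStepA t 0 p), pvStepA_shift t a p]
    ring

-- one PM's inner loop of B adds exactly A's per-PM contribution at each key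
lemma pvTotalsB_inner (t : String) (ps : List (String × Int)) (hn : (ps.map Prod.fst).Nodup)
    (d : PySem.Dict String Int) :
    (ps.foldl (fun d kv => d.insert kv.1 (d.getD kv.1 0 + kv.2)) d).getD t 0
      = d.getD t 0 + ((PySem.Dict.mk ps).get? t).getD 0 := by
  induction ps generalizing d with
  | nil => simp [PySem.Dict.get?]
  | cons kv rest ih =>
    simp only [List.map_cons, List.nodup_cons] at hn
    simp only [List.foldl_cons, ih hn.2]
    rw [PySem.Dict.get?_mk_cons]
    by_cases h : kv.1 = t
    · have hnone : (PySem.Dict.mk rest).get? t = none := by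
        rw [PySem.Dict.get?_eq_none_iff_not_mem_keys]
        subst h; simpa using hn.1
      subst h
      simp [PySem.Dict.getD_insert_self, hnone]
    · rw [PySem.Dict.getD_insert_of_ne]
      · have : (kv.1 == t) = false := by simp [h]
        simp [this]
      · exact Ne.symm h

-- B's totals dict holds A's per-ticker sum
lemma pvTotalsB_go (t : String) (pm : List (String × List (String × Int)))
    (hn : ∀ p ∈ pm, (p.2.map Prod.fst).Nodup) (d : PySem.Dict String Int) :
    (pm.foldl (fun totals p =>
        p.2.foldl (fun totals kv => totals.insert kv.1 (totals.getD kv.1 0 + kv.2)) totals)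
        d).getD t 0
      = d.getD t 0 + pvTotalA pm t := by
  induction pm generalizing d with
  | nil => simp [pvTotalA]
  | cons p rest ih =>
    simp only [List.foldl_cons]
    rw [ih (fun q hq => hn q (List.mem_cons_of_mem _ hq)),
        pvTotalsB_inner t p.2 (hn p (List.mem_cons_self ..)) d]
    have hA : pvTotalA (p :: rest) t = pvStepA t 0 p + pvTotalA rest t := by
      unfold pvTotalA
      rw [List.foldl_cons, pvTotalA_shift]
      rfl
    rw [hA]
    have hc : ((PySem.Dict.mk p.2).get? t).getD 0 = pvStepA t 0 p := by
      unfold pvStepA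
      rcases h : (PySem.Dict.mk p.2).get? t with _ | v <;>
        simp [PySem.Dict.contains_eq_isSome_get?, h]
    rw [hc]
    ring

lemma pvTotalsB_getD (pm_positions : List (String × List (String × Int)))
    (hn : ∀ p ∈ pm_positions, (p.2.map Prod.fst).Nodup) (t : String) :
    (pvTotalsB pm_positions).getD t 0 = pvTotalA pm_positions t := by
  unfold pvTotalsB
  rw [pvTotalsB_go t pm_positions hn PySem.Dict.empty]
  simp [PySem.Dict.getD_empty]

-- A's inner ticker loop appends exactly the rows B maps from the positive list
lemma pvInnerA_eq (pm_positions : List (String × List (String × Int)))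
    (hn : ∀ p ∈ pm_positions, (p.2.map Prod.fst).Nodup) (ti : Int)
    (all_tickers : List String) (data : List (List String)) :
    all_tickers.foldl (pvRowA pm_positions ti) data
      = data ++ (pvPositiveB (pvTotalsB pm_positions) all_tickers).map (pvMkRowB ti) := by
  induction all_tickers generalizing data with
  | nil => simp [pvPositiveB]
  | cons t rest ih =>
    have hstep : pvRowA pm_positions ti data t
        = if pvTotalA pm_positions t > 0
          then data ++ [pvMkRowB ti (t, pvTotalA pm_positions t)] else data := rfl
    rw [List.foldl_cons, hstep]
    by_cases h : pvTotalA pm_positions t > 0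
    · rw [if_pos h, ih]
      simp [pvPositiveB, List.filterMap_cons, pvTotalsB_getD pm_positions hn t, h]
    · rw [if_neg h, ih]
      simp [pvPositiveB, List.filterMap_cons, pvTotalsB_getD pm_positions hn t, h]

-- ===== VERDICT (by name: the statement is the Claim_ definition above) =====
theorem generate_merged_alpha_data_spec : Claim_equal_generate_merged_alpha_data := by
  intro pm_positions time_intervals all_tickers _ hpre
  unfold Spec_generate_merged_alpha_data generate_merged_alpha_data generate_merged_alpha_data_alt
  have h : ∀ data ti, all_tickers.foldl (pvRowA pm_positions ti) data
      = data ++ (pvPositiveB (pvTotalsB pm_positions) all_tickers).map (pvMkRowB ti) :=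
    fun data ti => pvInnerA_eq pm_positions hpre ti all_tickers data
  simp only [h]
  exact PySem.List.foldl_append_eq_flatMap _ _ []
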